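-- pv_equiv track=rewrite | github.com/larson3/GL | 201/Labs/lab8/lab8.py | count
-- ===== SOURCE A (Python) =====
-- def count(letter, myStr, theLen):
--     if theLen == 0:
--         return 0
--     else:
--         if myStr[0]==letter:
--             return 1+count(letter, myStr[1:], theLen-1)
--         else:
--             return count(letter, myStr[1:], theLen-1)
-- ===== SOURCE B (Python) =====
-- def count(letter, myStr, theLen):
--     total = 0
--     i = 0
--     while theLen != 0:
--         if myStr[i] == letter:
--             total += 1
--         i += 1
--         theLen -= 1
--     return total
-- ===== Notes on version B (the rewrite author's own statement) =====
-- stated objective: faster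
-- what changed: Replaces the O(n^2) recursion (each call copies myStr[1:]) with an iterative index-walking loop accumulating the total in O(n).
import Mathlib
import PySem

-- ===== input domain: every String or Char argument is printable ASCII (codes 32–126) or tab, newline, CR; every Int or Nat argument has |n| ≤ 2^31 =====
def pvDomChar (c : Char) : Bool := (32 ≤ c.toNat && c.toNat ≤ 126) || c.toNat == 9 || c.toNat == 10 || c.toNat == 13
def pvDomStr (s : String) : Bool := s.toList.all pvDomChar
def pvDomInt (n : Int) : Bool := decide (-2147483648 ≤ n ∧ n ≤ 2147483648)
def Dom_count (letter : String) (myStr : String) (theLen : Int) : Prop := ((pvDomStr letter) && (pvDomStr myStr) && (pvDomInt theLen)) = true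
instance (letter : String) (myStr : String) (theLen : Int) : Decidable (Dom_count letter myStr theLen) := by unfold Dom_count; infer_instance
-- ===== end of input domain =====

-- B replaces A's O(n^2) recursion (each call copies myStr[1:]) by an iterative index-walking loop in O(n).

-- ===== PORT A =====
-- A's recursion, on the character list; the [] ∧ n ≠ 0 case is where Python raises IndexError (excluded by Pre_count).
def countA (letter : String) (cs : List Char) (n : Int) : Int :=
  if n = 0 then 0
  else
    match cs with
    | [] => 0  -- Python: IndexError on myStr[0]; outside Pre_count
    | c :: rest =>
      if c.toString == letter then 1 + countA letter rest (n - 1)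
      else countA letter rest (n - 1)

def count (letter : String) (myStr : String) (theLen : Int) : Int :=
  countA letter myStr.toList theLen

-- ===== PORT B =====
-- B's while loop: state (total, i, theLen); myStr[i] via pyGet? (none = IndexError, outside Pre_count).
def countB (letter : String) (cs : List Char) (total : Int) (i : Nat) (n : Int) : Int :=
  if n = 0 then total
  else
    match h : PySem.List.pyGet? cs (i : Int) with
    | none => total  -- Python: IndexError on myStr[i]; outside Pre_count
    | some c => countB letter cs (if c.toString == letter then total + 1 else total) (i + 1) (n - 1)
termination_by cs.length - i
decreasing_by
  have hlt : i < cs.length := by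
    rw [PySem.List.pyGet?_natCast] at h
    obtain ⟨hlt, -⟩ := List.getElem?_eq_some_iff.mp h
    omega
  omega

def count_alt (letter : String) (myStr : String) (theLen : Int) : Int :=
  countB letter myStr.toList 0 0 theLen

-- ===== PRECONDITION & SPEC =====
-- Pre_count admits exactly the inputs on which A returns normally: 0 ≤ theLen ≤ len(myStr); elsewhere A raises IndexError.
def Pre_count (letter : String) (myStr : String) (theLen : Int) : Prop :=
  0 ≤ theLen ∧ theLen ≤ (myStr.toList.length : Int)
instance (letter : String) (myStr : String) (theLen : Int) : Decidable (Pre_count letter myStr theLen) := by unfold Pre_count; infer_instance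

def pvWitness_count : String × String × Int := ("a", "banana", 6)

def Spec_count (letter : String) (myStr : String) (theLen : Int) (out : Int) : Prop := out = count_alt letter myStr theLen
instance (letter : String) (myStr : String) (theLen : Int) (out : Int) : Decidable (Spec_count letter myStr theLen out) := by unfold Spec_count; infer_instance

-- ===== CLAIM =====
def Claim_equal_count : Prop := ∀ (letter : String) (myStr : String) (theLen : Int), Dom_count letter myStr theLen → Pre_count letter myStr theLen → Spec_count letter myStr theLen (count letter myStr theLen)

-- ===== LEMMAS AND PROOFS =====
lemma countA_eq_countP (letter : String) :
    ∀ (cs : List Char) (n : Int), 0 ≤ n → n ≤ (cs.length : Int) →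
      countA letter cs n = ((cs.take n.toNat).countP (fun c => c.toString == letter) : Int) := by
  intro cs
  induction cs with
  | nil =>
    intro n h0 hl
    simp at hl
    have : n = 0 := le_antisymm hl h0
    subst this
    simp [countA]
  | cons c rest ih =>
    intro n h0 hl
    by_cases hz : n = 0
    · subst hz; simp [countA]
    · have h1 : 0 ≤ n - 1 := by omega
      have h2 : n - 1 ≤ (rest.length : Int) := by simp at hl ⊢; omega
      have ht : n.toNat = (n - 1).toNat + 1 := by omega
      rw [countA]
      simp only [hz, if_false]
      rw [ih (n - 1) h1 h2, ht]
      simp only [List.take_succ_cons, List.countP_cons]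
      split_ifs <;> push_cast <;> omega

lemma countB_eq_countP (letter : String) (cs : List Char) :
    ∀ (k : Nat) (total : Int) (i : Nat) (n : Int), n = (k : Int) → i + k ≤ cs.length →
      countB letter cs total i n = total + (((cs.drop i).take k).countP (fun c => c.toString == letter) : Int) := by
  intro k
  induction k with
  | zero =>
    intro total i n hn _
    subst hn; simp [countB]
  | succ m ih =>
    intro total i n hn hb
    have hi : i < cs.length := by omega
    have hdrop : cs.drop i = cs[i] :: cs.drop (i + 1) := List.drop_eq_getElem_cons hi
    rw [countB]
    simp only [hn]
    rw [if_neg (by omega)]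
    split
    · rename_i h
      rw [PySem.List.pyGet?_natCast, List.getElem?_eq_getElem hi] at h
      exact absurd h (by simp)
    · rename_i c h
      rw [PySem.List.pyGet?_natCast, List.getElem?_eq_getElem hi] at h
      obtain rfl : cs[i] = c := by injection h
      rw [ih _ (i + 1) _ (by push_cast; ring) (by omega)]
      rw [hdrop, List.take_succ_cons, List.countP_cons]
      split_ifs <;> push_cast <;> omega

-- ===== VERDICT =====
theorem count_spec : Claim_equal_count := by
  intro letter myStr theLen _ hpre
  obtain ⟨h0, hl⟩ := hpre
  unfold Spec_count count count_alt
  rw [countA_eq_countP letter myStr.toList theLen h0 hl,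
    countB_eq_countP letter myStr.toList theLen.toNat 0 0 theLen (by omega) (by omega)]
  simp
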